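-- pv_equiv track=rewrite | github.com/koii-network/prometheus-beta | src/subsequence_partition.py | can_partition_subsequences
-- ===== SOURCE A (Python) =====
-- def can_partition_subsequences(s: str) -> bool:
--     """
--     Determine if a string of lowercase English letters can be divided into
--     subsequences of at least 2 letters where each subsequence consists of
--     either all vowels or all consonants.
--
--     Args:
--         s (str): Input string of lowercase English letters
--
--     Returns:
--         bool: True if the string can be partitioned, False otherwise
--     """
--     # Check for invalid input
--     if not s or len(s) < 2:
--         return False
--
--     # Define vowels and valid characters
--     vowels = set('aeiou')
--
--     # Helper function to check if a subsequence is valid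
--     def is_valid_subsequence(substr):
--         # Subsequence must be at least 2 letters
--         if len(substr) < 2:
--             return False
--
--         # Check if all characters are vowels or all are consonants
--         return all(c in vowels for c in substr) or all(c not in vowels for c in substr)
--
--     # Recursively try all possible partitions
--     def can_partition(remaining):
--         # Base case: if string is empty, it's a valid partition
--         if not remaining:
--             return True
--
--         # Try all possible subsequence lengths
--         for i in range(2, len(remaining) + 1):
--             subsequence = remaining[:i]
--
--             # If this subsequence is valid, check if rest can be partitioned
--             if is_valid_subsequence(subsequence):
--                 if can_partition(remaining[i:]):
--                     return True
--
--         return False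
--
--     return can_partition(s)
-- ===== SOURCE B (Python) =====
-- def can_partition_subsequences(s: str) -> bool:
--     # One pass over maximal same-type (vowel/non-vowel) runs: a valid partition
--     # exists iff every maximal run has length >= 2.
--     if len(s) < 2:
--         return False
--     vowels = set('aeiou')
--     n = len(s)
--     i = 0
--     while i < n:
--         j = i + 1
--         while j < n and (s[j] in vowels) == (s[i] in vowels):
--             j += 1
--         if j - i < 2:
--             return False
--         i = j
--     return True
-- ===== Notes on version B (the rewrite author's own statement) =====
-- stated objective: faster
-- what changed: Replaced the exponential recursive search over all prefix partitions by a single linear scan checking that every maximal run of same-type (vowel/non-vowel) characters has length at least 2.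
import Mathlib
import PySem

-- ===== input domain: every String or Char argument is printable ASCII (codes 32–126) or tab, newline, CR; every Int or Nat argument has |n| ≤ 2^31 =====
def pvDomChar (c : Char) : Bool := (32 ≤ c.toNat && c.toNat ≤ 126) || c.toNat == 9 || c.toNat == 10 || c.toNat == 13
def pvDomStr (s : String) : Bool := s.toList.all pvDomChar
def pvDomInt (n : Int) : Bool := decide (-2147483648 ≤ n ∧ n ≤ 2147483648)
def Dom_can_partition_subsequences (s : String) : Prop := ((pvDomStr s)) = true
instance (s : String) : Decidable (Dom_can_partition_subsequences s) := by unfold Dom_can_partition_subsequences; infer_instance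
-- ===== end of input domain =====

-- B replaces A's exponential recursive partition search by a single linear scan over maximal same-type runs.

-- ===== PORT A =====
def pvVowels : List Char := ['a', 'e', 'i', 'o', 'u']

def pvIsValidSub (sub : List Char) : Bool :=
  if sub.length < 2 then false
  else sub.all (fun c => pvVowels.contains c) || sub.all (fun c => !(pvVowels.contains c))

-- A's inner recursion; the fuel argument only makes the recursion structural
-- (it is always called with fuel > remaining length, so fuel is never exhausted).
def pvCanPart : Nat → List Char → Bool
  | 0, _ => false
  | n + 1, l =>
    if l.isEmpty then true
    else (List.range' 2 (l.length - 1)).any fun i =>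
      pvIsValidSub (l.take i) && pvCanPart n (l.drop i)

def can_partition_subsequences (s : String) : Bool :=
  let l := s.toList
  if l.length < 2 then false
  else pvCanPart (l.length + 1) l

-- ===== PORT B =====
def pvIsVowelB (c : Char) : Bool := ['a', 'e', 'i', 'o', 'u'].contains c

def pvRunsOk : List Char → Bool
  | [] => true
  | c :: rest =>
    let q := fun d => pvIsVowelB d == pvIsVowelB c
    if 1 + (rest.takeWhile q).length < 2 then false
    else pvRunsOk (rest.dropWhile q)
termination_by l => l.length
decreasing_by
  exact Nat.lt_succ_of_le (List.length_dropWhile_le _ _)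

def can_partition_subsequences_alt (s : String) : Bool :=
  let l := s.toList
  if l.length < 2 then false
  else pvRunsOk l

-- ===== PRECONDITION & SPEC =====
def Spec_can_partition_subsequences (s : String) (out : Bool) : Prop := out = can_partition_subsequences_alt s
instance (s : String) (out : Bool) : Decidable (Spec_can_partition_subsequences s out) := by unfold Spec_can_partition_subsequences; infer_instance

-- ===== CLAIM (what is proved, stated in full; the proofs are below) =====
def Claim_equal_can_partition_subsequences : Prop := ∀ (s : String), Dom_can_partition_subsequences s → Spec_can_partition_subsequences s (can_partition_subsequences s)

-- ===== LEMMAS AND PROOFS =====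

-- q-predicate used by B's run scan, for a fixed head character
def pvQ (c : Char) : Char → Bool := fun d => pvIsVowelB d == pvIsVowelB c

theorem pvQ_eq_of_same {c c' : Char} (h : pvIsVowelB c' = pvIsVowelB c) : pvQ c' = pvQ c := by
  funext d; simp [pvQ, h]

theorem pv_takeWhile_len_le (q : Char → Bool) (m : List Char) :
    (m.takeWhile q).length ≤ m.length :=
  (List.takeWhile_prefix q).length_le

theorem pvRunsOk_cons (c : Char) (rest : List Char) :
    pvRunsOk (c :: rest) = if 1 + (rest.takeWhile (pvQ c)).length < 2 then false
      else pvRunsOk (rest.dropWhile (pvQ c)) := by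
  rw [pvRunsOk]; rfl

theorem pv_dropWhile_eq_drop (q : Char → Bool) (m : List Char) :
    m.dropWhile q = m.drop (m.takeWhile q).length := by
  induction m with
  | nil => rfl
  | cons x xs ih =>
    by_cases h : q x = true
    · simp [h, ih]
    · simp [h]

theorem pv_dropWhile_drop (q : Char → Bool) :
    ∀ (m : List Char) (j : Nat), j ≤ (m.takeWhile q).length →
      (m.drop j).dropWhile q = m.dropWhile q := by
  intro m
  induction m with
  | nil => intro j _; simp
  | cons x xs ih =>
    intro j hj
    cases j with
    | zero => rfl
    | succ j' =>
      have hx : q x = true := by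
        by_cases h : q x = true
        · exact h
        · simp [h] at hj
      simp only [List.drop_succ_cons]
      rw [ih j' (by simpa [List.takeWhile_cons, hx] using hj)]
      simp [hx]

theorem pv_takeWhile_eq_take (q : Char → Bool) (m : List Char) :
    m.takeWhile q = m.take (m.takeWhile q).length := by
  have h := List.takeWhile_prefix (l := m) (p := q)
  exact List.prefix_iff_eq_take.mp h

theorem pv_take_all_le (q : Char → Bool) :
    ∀ (m : List Char) (k : Nat), (∀ x ∈ m.take k, q x = true) → k ≤ m.length →
      k ≤ (m.takeWhile q).length := by
  intro m
  induction m with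
  | nil => intro k _ hk; simpa using hk
  | cons x xs ih =>
    intro k hall hk
    cases k with
    | zero => exact Nat.zero_le _
    | succ k' =>
      have hx : q x = true := hall x (by simp)
      have : k' ≤ (xs.takeWhile q).length :=
        ih k' (fun y hy => hall y (by simp [List.take_succ_cons]; right; exact hy))
          (by simpa using hk)
      simpa [List.takeWhile_cons, hx] using Nat.succ_le_succ this

theorem pv_getElem_q (c : Char) (rest : List Char) (k : Nat)
    (hk : k < (rest.takeWhile (pvQ c)).length) :
    pvQ c (rest[k]'(Nat.lt_of_lt_of_le hk (pv_takeWhile_len_le _ _))) = true := by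
  have h2 : pvQ c ((rest.takeWhile (pvQ c))[k]'hk) = true :=
    List.mem_takeWhile_imp (List.getElem_mem hk)
  rw [List.getElem_of_eq (pv_takeWhile_eq_take (pvQ c) rest) hk] at h2
  simpa using h2

-- if B's scan accepts some tail starting inside the first run, it accepts the tail after the run
theorem pv_runsOk_drop_in_run (c : Char) (rest : List Char) (k : Nat)
    (hk : k ≤ (rest.takeWhile (pvQ c)).length)
    (h : pvRunsOk (rest.drop k) = true) :
    pvRunsOk (rest.dropWhile (pvQ c)) = true := by
  rcases Nat.lt_or_ge k (rest.takeWhile (pvQ c)).length with hlt | hge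
  · have hkr : k < rest.length := Nat.lt_of_lt_of_le hlt (pv_takeWhile_len_le _ _)
    have hdrop : rest.drop k = rest[k] :: rest.drop (k + 1) := List.drop_eq_getElem_cons hkr
    rw [hdrop] at h
    have hq : pvQ c rest[k] = true := pv_getElem_q c rest k hlt
    have hqq : pvQ rest[k] = pvQ c := pvQ_eq_of_same (by simpa [pvQ] using hq)
    rw [pvRunsOk_cons] at h
    rw [hqq] at h
    by_cases hguard : 1 + ((rest.drop (k + 1)).takeWhile (pvQ c)).length < 2
    · simp [hguard] at h
    · simp only [if_neg hguard] at h
      rwa [pv_dropWhile_drop (pvQ c) rest (k + 1) hlt] at h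
  · have hkw : k = (rest.takeWhile (pvQ c)).length := Nat.le_antisymm hk hge
    rw [pv_dropWhile_eq_drop, ← hkw]
    exact h

-- a valid subsequence taken off the front stays inside the first same-type run
theorem pv_valid_imp_le (c : Char) (rest : List Char) (k : Nat)
    (hk : k ≤ rest.length)
    (hv : pvIsValidSub ((c :: rest).take (k + 1)) = true) :
    k ≤ (rest.takeWhile (pvQ c)).length := by
  rw [List.take_succ_cons] at hv
  unfold pvIsValidSub at hv
  split at hv
  · exact absurd hv (by simp)
  · rcases Bool.or_eq_true_iff.mp hv with hall | hall
    · simp only [List.all_cons, Bool.and_eq_true, List.all_eq_true] at hall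
      refine pv_take_all_le (pvQ c) rest k (fun x hx => ?_) hk
      have h1 : pvIsVowelB x = true := hall.2 x hx
      have h2 : pvIsVowelB c = true := hall.1
      simp [pvQ, h1, h2]
    · simp only [List.all_cons, Bool.and_eq_true, List.all_eq_true,
        Bool.not_eq_eq_eq_not, Bool.not_true] at hall
      refine pv_take_all_le (pvQ c) rest k (fun x hx => ?_) hk
      have h1 : pvIsVowelB x = false := hall.2 x hx
      have h2 : pvIsVowelB c = false := hall.1
      simp [pvQ, h1, h2]

-- the whole first run (length ≥ 2) is a valid subsequence
theorem pv_valid_run (c : Char) (rest : List Char)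
    (hw : 1 ≤ (rest.takeWhile (pvQ c)).length) :
    pvIsValidSub ((c :: rest).take (1 + (rest.takeWhile (pvQ c)).length)) = true := by
  have htake : (c :: rest).take (1 + (rest.takeWhile (pvQ c)).length)
      = c :: rest.takeWhile (pvQ c) := by
    rw [Nat.add_comm, List.take_succ_cons, ← pv_takeWhile_eq_take]
  rw [htake]
  unfold pvIsValidSub
  rw [if_neg (by simp only [List.length_cons]; omega)]
  have hmem : ∀ x ∈ rest.takeWhile (pvQ c), pvIsVowelB x = pvIsVowelB c := by
    intro x hx
    have := List.mem_takeWhile_imp hx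
    simpa [pvQ] using this
  by_cases hc : pvIsVowelB c = true
  · apply Bool.or_eq_true_iff.mpr; left
    simp only [List.all_cons, Bool.and_eq_true, List.all_eq_true]
    refine ⟨by simpa [pvIsVowelB, pvVowels] using hc, fun x hx => ?_⟩
    have := hmem x hx
    rw [hc] at this
    simpa [pvIsVowelB, pvVowels] using this
  · apply Bool.or_eq_true_iff.mpr; right
    simp only [List.all_cons, Bool.and_eq_true, List.all_eq_true]
    have hc' : pvIsVowelB c = false := Bool.eq_false_iff.mpr hc
    refine ⟨by simpa [pvIsVowelB, pvVowels] using hc', fun x hx => ?_⟩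
    have := hmem x hx
    rw [hc'] at this
    simpa [pvIsVowelB, pvVowels] using this

theorem pv_main : ∀ (n : Nat) (l : List Char), l.length < n → pvCanPart n l = pvRunsOk l := by
  intro n
  induction n with
  | zero => intro l hl; omega
  | succ n ih =>
    intro l hl
    cases l with
    | nil => simp [pvCanPart, pvRunsOk]
    | cons c rest =>
      have hl' : rest.length < n := by simp only [List.length_cons] at hl; omega
      rw [pvCanPart, pvRunsOk_cons]
      simp only [List.isEmpty_cons, Bool.false_eq_true, if_false, List.length_cons,
        Nat.add_sub_cancel]
      rw [Bool.eq_iff_iff]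
      constructor
      · intro hany
        rcases List.any_eq_true.mp hany with ⟨i, hmem, hi⟩
        have hrange := List.mem_range'_1.mp hmem
        obtain ⟨k, rfl⟩ : ∃ k, i = k + 1 := ⟨i - 1, by omega⟩
        rw [Bool.and_eq_true] at hi
        have hklen : k ≤ rest.length := by omega
        have hkw := pv_valid_imp_le c rest k hklen hi.1
        have hdl : (c :: rest).drop (k + 1) = rest.drop k := List.drop_succ_cons
        have hih : pvCanPart n (rest.drop k) = pvRunsOk (rest.drop k) := by
          apply ih
          have : (rest.drop k).length ≤ rest.length := by simp
          omega
        rw [hdl, hih] at hi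
        have := pv_runsOk_drop_in_run c rest k hkw hi.2
        rw [if_neg (by omega)]
        exact this
      · intro hrhs
        by_cases hguard : 1 + (rest.takeWhile (pvQ c)).length < 2
        · rw [if_pos hguard] at hrhs; exact absurd hrhs (by simp)
        · rw [if_neg hguard] at hrhs
          have hw : 1 ≤ (rest.takeWhile (pvQ c)).length := by omega
          have hwlen : (rest.takeWhile (pvQ c)).length ≤ rest.length :=
            pv_takeWhile_len_le _ _
          apply List.any_eq_true.mpr
          refine ⟨1 + (rest.takeWhile (pvQ c)).length, List.mem_range'_1.mpr ⟨by omega, by omega⟩, ?_⟩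
          rw [Bool.and_eq_true]
          refine ⟨pv_valid_run c rest hw, ?_⟩
          have hdl : (c :: rest).drop (1 + (rest.takeWhile (pvQ c)).length)
              = rest.drop (rest.takeWhile (pvQ c)).length := by
            rw [Nat.add_comm]; exact List.drop_succ_cons
          rw [hdl]
          have hih : pvCanPart n (rest.drop (rest.takeWhile (pvQ c)).length)
              = pvRunsOk (rest.drop (rest.takeWhile (pvQ c)).length) := by
            apply ih
            have : (rest.drop (rest.takeWhile (pvQ c)).length).length ≤ rest.length := by simp
            omega
          rw [hih, ← pv_dropWhile_eq_drop]
          exact hrhs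

-- ===== VERDICT (by name: the statement is the Claim_ definition above) =====
theorem can_partition_subsequences_spec : Claim_equal_can_partition_subsequences := by
  intro s _
  unfold Spec_can_partition_subsequences can_partition_subsequences can_partition_subsequences_alt
  show (if s.toList.length < 2 then false else pvCanPart (s.toList.length + 1) s.toList)
      = (if s.toList.length < 2 then false else pvRunsOk s.toList)
  rw [pv_main (s.toList.length + 1) s.toList (Nat.lt_succ_self _)]
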